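-- pv_equiv track=rewrite | github.com/josevasconcelos2002/PL2025-A100763 | TPC2/tpc2.py | lista_compositores
-- ===== SOURCE A (Python) =====
-- def lista_compositores(obras_dic):
--     compositores = set()
--
--     for obra in obras_dic.values():
--         compositor = obra.get("compositor", "").strip()
--         if compositor:
--
--             if "," in compositor:
--                 partes = compositor.split(",", 1)
--                 compositor = partes[1].strip() + " " + partes[0].strip()
--
--             compositores.add(compositor)
--
--     return sorted(compositores)
-- ===== SOURCE B (Python) =====
-- def lista_compositores(obras_dic):
--     # Single normalization pass -> sort (with duplicates) -> adjacency dedup scan; no set.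
--     def norm(obra):
--         c = obra.get("compositor", "").strip()
--         if c and "," in c:
--             antes, depois = c.split(",", 1)
--             c = depois.strip() + " " + antes.strip()
--         return c
--
--     names = sorted(n for n in map(norm, obras_dic.values()) if n)
--     out = []
--     prev = None
--     for n in names:
--         if n != prev:
--             out.append(n)
--             prev = n
--     return out
-- ===== Notes on version B (the rewrite author's own statement) =====
-- stated objective: alternative
-- what changed: Instead of accumulating a set inside the loop and sorting it, B maps the normalization over the values, filters out empties, sorts the list with duplicates, and removes duplicates by an adjacency scan (compare with the previous element); no set is used.
import Mathlib
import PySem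

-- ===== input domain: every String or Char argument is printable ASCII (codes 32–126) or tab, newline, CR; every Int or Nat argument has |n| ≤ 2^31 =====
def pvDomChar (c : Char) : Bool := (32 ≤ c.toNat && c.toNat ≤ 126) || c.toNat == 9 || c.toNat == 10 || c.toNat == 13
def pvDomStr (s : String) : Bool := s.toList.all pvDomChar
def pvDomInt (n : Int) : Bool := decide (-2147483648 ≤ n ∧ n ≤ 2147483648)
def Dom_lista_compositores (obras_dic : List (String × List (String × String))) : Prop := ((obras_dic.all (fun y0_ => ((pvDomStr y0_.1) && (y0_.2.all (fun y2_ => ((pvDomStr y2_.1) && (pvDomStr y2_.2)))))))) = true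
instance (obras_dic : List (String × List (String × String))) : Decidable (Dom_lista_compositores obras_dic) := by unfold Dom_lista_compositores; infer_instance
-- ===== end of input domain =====

-- B replaces A's set-accumulating loop by map/filter + sort-with-duplicates + adjacency dedup scan (objective: alternative; same cost).

-- ===== PORT A =====
def lista_compositores (obras_dic : List (String × List (String × String))) : List String :=
  let compositores : PySem.Set String :=
    (PySem.Dict.ofList obras_dic).values.foldl (fun (s : PySem.Set String) obra =>
      let compositor := PySem.Str.strip (PySem.Dict.getD (PySem.Dict.ofList obra) "compositor" "")
      if compositor ≠ "" then
        let compositor :=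
          if PySem.Str.isIn "," compositor then
            let partes := (PySem.Str.splitMax? compositor "," 1).getD []
            PySem.Str.strip (PySem.List.pyGetD partes 1 "") ++ " " ++ PySem.Str.strip (PySem.List.pyGetD partes 0 "")
          else compositor
        PySem.Set.add s compositor
      else s) PySem.Set.empty
  PySem.List.sorted compositores (fun x => x) false

-- ===== PORT B =====
def pvNorm (obra : List (String × String)) : String :=
  let c := PySem.Str.strip (PySem.Dict.getD (PySem.Dict.ofList obra) "compositor" "")
  if c ≠ "" ∧ PySem.Str.isIn "," c then
    let partes := (PySem.Str.splitMax? c "," 1).getD []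
    PySem.Str.strip (PySem.List.pyGetD partes 1 "") ++ " " ++ PySem.Str.strip (PySem.List.pyGetD partes 0 "")
  else c

def lista_compositores_alt (obras_dic : List (String × List (String × String))) : List String :=
  let names := PySem.List.sorted
    (((PySem.Dict.ofList obras_dic).values.map pvNorm).filter (fun n => n ≠ ""))
    (fun x => x) false
  (names.foldl (fun (st : List String × Option String) n =>
      if some n ≠ st.2 then (st.1 ++ [n], some n) else st) ([], none)).1

-- ===== PRECONDITION & SPEC =====
def Spec_lista_compositores (obras_dic : List (String × List (String × String))) (out : List String) : Prop := out = lista_compositores_alt obras_dic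
instance (obras_dic : List (String × List (String × String))) (out : List String) : Decidable (Spec_lista_compositores obras_dic out) := by unfold Spec_lista_compositores; infer_instance

-- ===== CLAIM (what is proved, stated in full; the proofs are below) =====
def Claim_equal_lista_compositores : Prop := ∀ (obras_dic : List (String × List (String × String))), Dom_lista_compositores obras_dic → Spec_lista_compositores obras_dic (lista_compositores obras_dic)

-- ===== LEMMAS AND PROOFS =====

-- proof-only recursive form of B's adjacency-dedup loop
def pvDedupP (prev : Option String) : List String → List String
  | [] => []
  | a :: t => if some a = prev then pvDedupP prev t else a :: pvDedupP (some a) t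

theorem pvFoldl_dedup (s : List String) : ∀ (out : List String) (prev : Option String),
    (s.foldl (fun (st : List String × Option String) n =>
      if some n ≠ st.2 then (st.1 ++ [n], some n) else st) (out, prev)).1 = out ++ pvDedupP prev s := by
  induction s with
  | nil => intro out prev; simp [pvDedupP]
  | cons a t ih =>
    intro out prev
    rw [List.foldl_cons]
    by_cases h : some a = prev
    · have e : (if some a ≠ (out, prev).2 then ((out, prev).1 ++ [a], some a) else (out, prev)) = (out, prev) := by simp [h]
      rw [e]
      simp only [pvDedupP, if_pos h]
      exact ih out prev
    · have e : (if some a ≠ (out, prev).2 then ((out, prev).1 ++ [a], some a) else (out, prev)) = (out ++ [a], some a) := by simp [h]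
      rw [e]
      simp only [pvDedupP, if_neg h]
      rw [ih]
      simp

theorem pvDedupP_spec (s : List String) (hs : s.Pairwise (· ≤ ·)) :
    ∀ (p : Option String), (∀ y ∈ s, ∀ q ∈ p, q ≤ y) →
      (pvDedupP p s).Pairwise (· < ·) ∧ (∀ x, x ∈ pvDedupP p s ↔ x ∈ s ∧ some x ≠ p) := by
  induction s with
  | nil => intro p _; simp [pvDedupP]
  | cons a t ih =>
    intro p hp
    have ha : ∀ y ∈ t, a ≤ y := fun y hy => (List.pairwise_cons.1 hs).1 y hy
    have ht : t.Pairwise (· ≤ ·) := (List.pairwise_cons.1 hs).2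
    by_cases h : some a = p
    · have ⟨h1, h2⟩ := ih ht p (fun y hy q hq => hp y (List.mem_cons_of_mem a hy) q hq)
      refine ⟨by simpa [pvDedupP, h] using h1, fun x => ?_⟩
      simp only [pvDedupP, if_pos h]
      rw [h2]
      constructor
      · rintro ⟨hx, hne⟩; exact ⟨List.mem_cons_of_mem a hx, hne⟩
      · rintro ⟨hx, hne⟩
        rcases List.mem_cons.1 hx with rfl | hx
        · exact absurd h hne
        · exact ⟨hx, hne⟩
    · have ⟨h1, h2⟩ := ih ht (some a) (by intro y hy q hq; simp at hq; subst hq; exact ha y hy)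
      simp only [pvDedupP, if_neg h]
      constructor
      · refine List.pairwise_cons.2 ⟨fun x hx => ?_, h1⟩
        have hx' := (h2 x).1 hx
        exact lt_of_le_of_ne (ha x hx'.1) (fun he => hx'.2 (by rw [he]))
      · intro x
        rw [List.mem_cons, h2]
        constructor
        · rintro (rfl | ⟨hx, hne⟩)
          · exact ⟨List.mem_cons_self, h⟩
          · refine ⟨List.mem_cons_of_mem a hx, fun he => hne ?_⟩
            have hxa : x ≤ a := hp a List.mem_cons_self x (by simp [← he])
            have hax : a ≤ x := ha x hx
            exact congrArg some (le_antisymm hxa hax)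
        · rintro ⟨hx, hne⟩
          rcases List.mem_cons.1 hx with rfl | hx
          · exact Or.inl rfl
          · by_cases hxa : x = a
            · exact Or.inl hxa
            · exact Or.inr ⟨hx, by simpa using hxa⟩

theorem pvAppend_space_ne_empty (x y : String) : x ++ " " ++ y ≠ "" := by
  intro h
  have := congrArg String.length h
  simp [String.length_append] at this

theorem pvNorm_body (s : PySem.Set String) (obra : List (String × String)) :
    (let compositor := PySem.Str.strip (PySem.Dict.getD (PySem.Dict.ofList obra) "compositor" "")
     if compositor ≠ "" then
       let compositor :=
         if PySem.Str.isIn "," compositor then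
           let partes := (PySem.Str.splitMax? compositor "," 1).getD []
           PySem.Str.strip (PySem.List.pyGetD partes 1 "") ++ " " ++ PySem.Str.strip (PySem.List.pyGetD partes 0 "")
         else compositor
       PySem.Set.add s compositor
     else s)
    = if pvNorm obra ≠ "" then PySem.Set.add s (pvNorm obra) else s := by
  simp only [pvNorm]
  set c := PySem.Str.strip (PySem.Dict.getD (PySem.Dict.ofList obra) "compositor" "") with hc
  by_cases h0 : c = ""
  · simp [h0]
  · rw [if_pos h0]
    by_cases hin : PySem.Str.isIn "," c = true
    · rw [if_pos hin, if_pos (show c ≠ "" ∧ PySem.Str.isIn "," c = true from ⟨h0, hin⟩),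
        if_pos (pvAppend_space_ne_empty _ _)]
    · rw [if_neg hin, if_neg (show ¬ (c ≠ "" ∧ PySem.Str.isIn "," c = true) from fun hh => hin hh.2),
        if_pos h0]

theorem pvLoopA_fold (l : List (List (String × String))) : ∀ (acc : PySem.Set String),
    l.foldl (fun (s : PySem.Set String) obra =>
      let compositor := PySem.Str.strip (PySem.Dict.getD (PySem.Dict.ofList obra) "compositor" "")
      if compositor ≠ "" then
        let compositor :=
          if PySem.Str.isIn "," compositor then
            let partes := (PySem.Str.splitMax? compositor "," 1).getD []
            PySem.Str.strip (PySem.List.pyGetD partes 1 "") ++ " " ++ PySem.Str.strip (PySem.List.pyGetD partes 0 "")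
          else compositor
        PySem.Set.add s compositor
      else s) acc
    = l.foldl (fun s v => if pvNorm v ≠ "" then PySem.Set.add s (pvNorm v) else s) acc := by
  induction l with
  | nil => intro acc; rw [List.foldl_nil, List.foldl_nil]
  | cons v t ih =>
    intro acc
    rw [List.foldl_cons, List.foldl_cons, ih]
    exact congrArg (fun z => List.foldl (fun s v => if pvNorm v ≠ "" then PySem.Set.add s (pvNorm v) else s) z t) (pvNorm_body acc v)

theorem pvLoopG (l : List (List (String × String))) : ∀ (acc : PySem.Set String),
    l.foldl (fun s v => if pvNorm v ≠ "" then PySem.Set.add s (pvNorm v) else s) acc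
    = PySem.Set.update acc ((l.map pvNorm).filter (fun n => n ≠ "")) := by
  induction l with
  | nil => intro acc; simp [PySem.Set.update]
  | cons v t ih =>
    intro acc
    rw [List.foldl_cons, ih]
    by_cases h : pvNorm v = ""
    · simp [h, PySem.Set.update]
    · simp [h, PySem.Set.update]

-- ===== VERDICT (by name: the statement is the Claim_ definition above) =====
theorem lista_compositores_spec : Claim_equal_lista_compositores := by
  intro obras_dic _
  simp only [lista_compositores, lista_compositores_alt, Spec_lista_compositores]
  rw [pvLoopA_fold, pvLoopG]
  simp only [PySem.Set.empty]
  rw [PySem.Set.update_nil_left]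
  set xs := (((PySem.Dict.ofList obras_dic).values.map pvNorm).filter (fun n => n ≠ "")) with hxs
  set s := PySem.List.sorted xs (fun x => x) false with hsdef
  rw [pvFoldl_dedup, List.nil_append]
  have hpw : s.Pairwise (· ≤ ·) := PySem.List.sorted_pairwise xs (fun x => x)
  have ⟨hlt, hmem⟩ := pvDedupP_spec s hpw none (by simp)
  apply PySem.List.sorted_eq_of_perm_of_pairwise_lt
  · rw [List.perm_ext_iff_of_nodup (hlt.imp ne_of_lt) (PySem.Set.nodup_ofList xs)]
    intro x
    rw [hmem, PySem.Set.mem_ofList, PySem.List.mem_sorted]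
    simp
  · exact hlt
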